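-- pv_equiv track=rewrite | github.com/Chaithanya67/Vertex-Clustering | core/utils.py | maximum_count_covering
-- ===== SOURCE A (Python) =====
-- def shingle_cover(shingle_vector_a, shingle_vector_b):
--     assert len(shingle_vector_a) == len(shingle_vector_b), "shingle must have same length"
--     for i in range(len(shingle_vector_a)):
--         # None non mi convince molto per modellare "*"
--         with_mask = shingle_vector_b[i] is None or shingle_vector_a[i] is None
--         if shingle_vector_a[i] != shingle_vector_b[i] and not with_mask:
--             return False
--     return True
--
-- def maximum_count_covering(hashtable, masked_shingle_vector):
--     #Bruttura per inizializzare il massimo al primo shingle_vector che trovo che copre quello masked dato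
--     max_vector = []
--     for vector in hashtable.keys():
--         found = False
--         if (shingle_cover(masked_shingle_vector, vector)):
--             max_vector = vector
--             found = True
--             break
--     if(not found):
--         return None
--     for vector in hashtable.keys():
--         if(shingle_cover(masked_shingle_vector, vector) and hashtable[max_vector] < hashtable[vector]):
--             max_vector = vector
--
--     if max_vector == []:
--         max_vector = tuple([None] * 8)
--     return max_vector
-- ===== SOURCE B (Python) =====
-- def shingle_cover(shingle_vector_a, shingle_vector_b):
--     assert len(shingle_vector_a) == len(shingle_vector_b), "shingle must have same length"
--     for i in range(len(shingle_vector_a)):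
--         with_mask = shingle_vector_b[i] is None or shingle_vector_a[i] is None
--         if shingle_vector_a[i] != shingle_vector_b[i] and not with_mask:
--             return False
--     return True
--
-- def maximum_count_covering(hashtable, masked_shingle_vector):
--     # single pass over the items, tracking the best (vector, count) pair so far;
--     # strict '<' keeps the first key on count ties, matching dict lookup semantics
--     best = None
--     for vector, count in hashtable.items():
--         if shingle_cover(masked_shingle_vector, vector):
--             if best is None or best[1] < count:
--                 best = (vector, count)
--     return None if best is None else best[0]
-- ===== Notes on version B (the rewrite author's own statement) =====
-- stated objective: simpler
-- what changed: Replaces A's two scans over the keys (one to find a first cover, one that re-looks each candidate's count up in the dict) by a single pass over hashtable.items() tracking the best (vector,count) pair, dropping the dead '== []' branch and the repeated dict lookups.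
-- crash fix: On an empty hashtable A raises UnboundLocalError ('found' is never bound); B returns None. — e.g. on maximum_count_covering([], [some 1]): A raises UnboundLocalError, B returns none
import Mathlib
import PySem

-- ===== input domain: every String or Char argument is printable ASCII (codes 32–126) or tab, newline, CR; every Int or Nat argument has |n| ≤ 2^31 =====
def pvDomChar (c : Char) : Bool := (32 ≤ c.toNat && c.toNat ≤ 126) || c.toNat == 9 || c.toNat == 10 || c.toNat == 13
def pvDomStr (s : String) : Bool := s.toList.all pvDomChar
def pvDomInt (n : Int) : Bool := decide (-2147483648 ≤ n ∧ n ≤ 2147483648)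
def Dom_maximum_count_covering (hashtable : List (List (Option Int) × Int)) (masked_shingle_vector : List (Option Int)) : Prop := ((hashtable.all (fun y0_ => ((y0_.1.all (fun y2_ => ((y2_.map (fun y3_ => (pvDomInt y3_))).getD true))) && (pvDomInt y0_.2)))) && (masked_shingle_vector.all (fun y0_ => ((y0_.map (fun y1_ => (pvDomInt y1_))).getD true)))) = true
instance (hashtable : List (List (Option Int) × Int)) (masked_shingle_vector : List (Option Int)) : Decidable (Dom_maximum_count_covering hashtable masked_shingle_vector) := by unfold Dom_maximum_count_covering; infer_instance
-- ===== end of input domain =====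

-- B collapses A's two scans (find a first cover, then re-scan with dict lookups) into one
-- pass over the items tracking the best (vector, count) pair; objective: simpler.


-- ===== PORT A =====
-- helper shingle_cover, shared by both Pythons; exact on equal-length vectors
-- (the AssertionError on unequal lengths is excluded by Pre_)
def shingle_cover : List (Option Int) → List (Option Int) → Bool
  | [], _ => true
  | _ :: _, [] => true   -- unreachable under Pre_ (equal lengths)
  | a :: as_, b :: bs =>
      if a ≠ b ∧ ¬ (b = none ∨ a = none) then false else shingle_cover as_ bs

-- hashtable[k]: first-match lookup; KeyError impossible in A (k is always a key), default 0 is never used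
def pyLookup : List (List (Option Int) × Int) → List (Option Int) → Int
  | [], _ => 0
  | (k, v) :: rest, x => if k = x then v else pyLookup rest x

-- A's first loop: first key covering the masked vector (found flag + break)
def findCover (m : List (Option Int)) : List (List (Option Int) × Int) → Option (List (Option Int))
  | [] => none
  | (v, _) :: rest => if shingle_cover m v then some v else findCover m rest

def maximum_count_covering (hashtable : List (List (Option Int) × Int)) (masked_shingle_vector : List (Option Int)) : Option (List (Option Int)) :=
  match findCover masked_shingle_vector hashtable with
  | none => none                 -- if not found: return None
  | some v0 =>
      -- second loop over the keys, re-looking counts up in the dict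
      some (hashtable.foldl
        (fun mv p =>
          if shingle_cover masked_shingle_vector p.1 = true ∧
             pyLookup hashtable mv < pyLookup hashtable p.1
          then p.1 else mv) v0)
      -- Python's trailing 'if max_vector == []' compares a tuple with a list: always False, dead

-- ===== PORT B =====
def maximum_count_covering_alt (hashtable : List (List (Option Int) × Int)) (masked_shingle_vector : List (Option Int)) : Option (List (Option Int)) :=
  match hashtable.foldl
    (fun best p =>
      if shingle_cover masked_shingle_vector p.1 then
        match best with
        | none => some (p.1, p.2)
        | some (bv, bc) => if bc < p.2 then some (p.1, p.2) else some (bv, bc)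
      else best)
    (none : Option (List (Option Int) × Int)) with
  | none => none
  | some (v, _) => some v

-- ===== PRECONDITION & SPEC =====
-- Pre_ excludes exactly the inputs where Python A raises: the empty dict (UnboundLocalError:
-- 'found' is never bound) and a key whose length differs from the masked vector's (AssertionError
-- in shingle_cover); the Nodup clause is the representation invariant of a Python dict
-- (an association list with duplicate keys denotes no dict).
def Pre_maximum_count_covering (hashtable : List (List (Option Int) × Int)) (masked_shingle_vector : List (Option Int)) : Prop :=
  hashtable ≠ [] ∧
  (∀ p ∈ hashtable, p.1.length = masked_shingle_vector.length) ∧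
  (hashtable.map Prod.fst).Nodup
instance (hashtable : List (List (Option Int) × Int)) (masked_shingle_vector : List (Option Int)) : Decidable (Pre_maximum_count_covering hashtable masked_shingle_vector) := by unfold Pre_maximum_count_covering; infer_instance

def pvWitness_maximum_count_covering : (List (List (Option Int) × Int)) × List (Option Int) :=
  ([([some 1, none], 2), ([none, some 2], 5)], [some 1, none])

-- On an empty hashtable A raises UnboundLocalError ('found' is never bound); B returns None.
def Raises_maximum_count_covering (hashtable : List (List (Option Int) × Int)) (masked_shingle_vector : List (Option Int)) : Prop :=
  hashtable = []
instance (hashtable : List (List (Option Int) × Int)) (masked_shingle_vector : List (Option Int)) : Decidable (Raises_maximum_count_covering hashtable masked_shingle_vector) := by unfold Raises_maximum_count_covering; infer_instance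
def pvRaiseWitness_maximum_count_covering : (List (List (Option Int) × Int)) × List (Option Int) := ([], [some 1])
def pvRaiseWitnessOut_maximum_count_covering : Option (List (Option Int)) := none

def Spec_maximum_count_covering (hashtable : List (List (Option Int) × Int)) (masked_shingle_vector : List (Option Int)) (out : Option (List (Option Int))) : Prop := out = maximum_count_covering_alt hashtable masked_shingle_vector
instance (hashtable : List (List (Option Int) × Int)) (masked_shingle_vector : List (Option Int)) (out : Option (List (Option Int))) : Decidable (Spec_maximum_count_covering hashtable masked_shingle_vector out) := by unfold Spec_maximum_count_covering; infer_instance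

-- ===== CLAIM (what is proved, stated in full; the proofs are below) =====
def Claim_equal_maximum_count_covering : Prop := ∀ (hashtable : List (List (Option Int) × Int)) (masked_shingle_vector : List (Option Int)), Dom_maximum_count_covering hashtable masked_shingle_vector → Pre_maximum_count_covering hashtable masked_shingle_vector → Spec_maximum_count_covering hashtable masked_shingle_vector (maximum_count_covering hashtable masked_shingle_vector)
def Claim_raises_maximum_count_covering : Prop := (∀ (hashtable : List (List (Option Int) × Int)) (masked_shingle_vector : List (Option Int)), Dom_maximum_count_covering hashtable masked_shingle_vector → Raises_maximum_count_covering hashtable masked_shingle_vector → ¬ Pre_maximum_count_covering hashtable masked_shingle_vector) ∧ (Dom_maximum_count_covering (pvRaiseWitness_maximum_count_covering.1) (pvRaiseWitness_maximum_count_covering.2) ∧ Raises_maximum_count_covering (pvRaiseWitness_maximum_count_covering.1) (pvRaiseWitness_maximum_count_covering.2) ∧ maximum_count_covering_alt (pvRaiseWitness_maximum_count_covering.1) (pvRaiseWitness_maximum_count_covering.2) = pvRaiseWitnessOut_maximum_count_covering)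

-- ===== LEMMAS AND PROOFS =====

-- in a dict (nodup keys), first-match lookup of a present key returns its paired value
lemma pyLookup_mem (ht : List (List (Option Int) × Int))
    (hnd : (ht.map Prod.fst).Nodup) :
    ∀ p ∈ ht, pyLookup ht p.1 = p.2 := by
  induction ht with
  | nil => intro p hp; cases hp
  | cons q rest ih =>
      obtain ⟨k, v⟩ := q
      simp only [List.map_cons, List.nodup_cons] at hnd
      intro p hp
      rcases List.mem_cons.mp hp with rfl | hp
      · simp [pyLookup]
      · have hk : k ≠ p.1 := by
          intro h; exact hnd.1 (h ▸ (List.mem_map.mpr ⟨p, hp, rfl⟩))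
        simpa [pyLookup, hk] using ih hnd.2 p hp

-- B's fold after the first cover tracks (A's running max, its count)
lemma foldB_some (ht : List (List (Option Int) × Int)) (m : List (Option Int)) :
    ∀ (l : List (List (Option Int) × Int)),
      (∀ p ∈ l, pyLookup ht p.1 = p.2) → ∀ bv,
      l.foldl
        (fun best p =>
          if shingle_cover m p.1 then
            match best with
            | none => some (p.1, p.2)
            | some (bv, bc) => if bc < p.2 then some (p.1, p.2) else some (bv, bc)
          else best)
        (some (bv, pyLookup ht bv))
      = some (l.foldl
          (fun mv p =>
            if shingle_cover m p.1 = true ∧ pyLookup ht mv < pyLookup ht p.1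
            then p.1 else mv) bv,
          pyLookup ht (l.foldl
          (fun mv p =>
            if shingle_cover m p.1 = true ∧ pyLookup ht mv < pyLookup ht p.1
            then p.1 else mv) bv)) := by
  intro l
  induction l with
  | nil => intro _ bv; rfl
  | cons q rest ih =>
      intro hl bv
      obtain ⟨k, c⟩ := q
      have hc : pyLookup ht k = c := hl (k, c) (List.mem_cons_self)
      have hrest : ∀ p ∈ rest, pyLookup ht p.1 = p.2 :=
        fun p hp => hl p (List.mem_cons_of_mem _ hp)
      by_cases hcov : shingle_cover m k
      · by_cases hlt : pyLookup ht bv < c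
        · have := ih hrest k
          rw [hc] at this
          simpa [List.foldl_cons, hcov, hc, hlt] using this
        · simpa [List.foldl_cons, hcov, hc, hlt] using ih hrest bv
      · simpa [List.foldl_cons, hcov] using ih hrest bv

-- main correspondence: B's one-pass fold computes A's (find first cover, then maximise)
lemma foldB_main (ht : List (List (Option Int) × Int)) (m : List (Option Int)) :
    ∀ (l : List (List (Option Int) × Int)),
      (∀ p ∈ l, pyLookup ht p.1 = p.2) →
      l.foldl
        (fun best p =>
          if shingle_cover m p.1 then
            match best with
            | none => some (p.1, p.2)
            | some (bv, bc) => if bc < p.2 then some (p.1, p.2) else some (bv, bc)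
          else best)
        (none : Option (List (Option Int) × Int))
      = match findCover m l with
        | none => none
        | some v0 => some (l.foldl
            (fun mv p =>
              if shingle_cover m p.1 = true ∧ pyLookup ht mv < pyLookup ht p.1
              then p.1 else mv) v0,
            pyLookup ht (l.foldl
            (fun mv p =>
              if shingle_cover m p.1 = true ∧ pyLookup ht mv < pyLookup ht p.1
              then p.1 else mv) v0)) := by
  intro l
  induction l with
  | nil => intro _; rfl
  | cons q rest ih =>
      intro hl
      obtain ⟨k, c⟩ := q
      have hc : pyLookup ht k = c := hl (k, c) (List.mem_cons_self)
      have hrest : ∀ p ∈ rest, pyLookup ht p.1 = p.2 :=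
        fun p hp => hl p (List.mem_cons_of_mem _ hp)
      by_cases hcov : shingle_cover m k
      · simp only [List.foldl_cons, findCover, hcov, if_pos, ← hc]
        simpa [hcov, lt_irrefl] using foldB_some ht m rest hrest k
      · simp only [List.foldl_cons, findCover, hcov]
        simpa [hcov] using ih hrest

-- ===== VERDICT (by name: the statement is the Claim_ definition above) =====
theorem maximum_count_covering_spec : Claim_equal_maximum_count_covering := by
  intro ht m _ hpre
  unfold Spec_maximum_count_covering maximum_count_covering maximum_count_covering_alt
  have hl : ∀ p ∈ ht, pyLookup ht p.1 = p.2 := pyLookup_mem ht hpre.2.2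
  rw [foldB_main ht m ht hl]
  cases findCover m ht <;> rfl

@[simp] theorem maximum_count_covering_raises : Claim_raises_maximum_count_covering := by
  unfold Claim_raises_maximum_count_covering
  refine ⟨?_, by decide⟩
  intro ht m _ hr hpre
  exact hpre.1 hr
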